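-- pv_equiv track=rewrite | github.com/socialplanning/opencore-listen | Products/listen/lib/browser_utils.py | splitOnSpace
-- ===== SOURCE A (Python) =====
-- MAX_MAIL_WIDTH = 78
--
-- def splitOnSpace(line, quote_chars):
--     # XXX: rewrap poorly by breaking at the earliest word and using
--     # that as the next line.
--     # The length of the line minus any trailing whitespace
--     line_len = len(line.rstrip())
--     # Return if the line is acceptable as is
--     if line_len <= MAX_MAIL_WIDTH:
--         return (line,)
--     # find the next space, start at the character before the
--     # newline, and quit at the quotes:
--     for space_index in range(MAX_MAIL_WIDTH, len(quote_chars)-1, -1):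
--         if line[space_index] in [' ','\t']:
--             break
--     # If we didn't find a space then we have a long string with no
--     # spaces, we need to ensure that there are no spaces after this
--     # string to break on
--     if space_index <= len(quote_chars):
--         for space_index in range(MAX_MAIL_WIDTH+1, line_len):
--             if line[space_index] in [' ','\t']:
--                 break
--     if space_index >= line_len-1:
--         return (line,)
--     else:
--         first_line = line[:space_index]
--         next_line = quote_chars + line[space_index+1:]
--         # Split the newly split line if necessary
--         next_lines = splitOnSpace(next_line, quote_chars)
--     return (first_line ,) + next_lines
-- ===== SOURCE B (Python) =====
-- MAX_MAIL_WIDTH = 78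
--
-- def splitOnSpace(line, quote_chars):
--     # Iterative rewrap: a result list and a loop replace A's tail recursion
--     # and repeated tuple concatenations; split positions are found with
--     # next() over the same index ranges.
--     nq = len(quote_chars)
--     result = []
--     current = line
--     while True:
--         line_len = len(current.rstrip())
--         if line_len <= MAX_MAIL_WIDTH:
--             result.append(current)
--             break
--         # last space/tab at an index in [nq, MAX_MAIL_WIDTH] (default nq)
--         si = next((i for i in range(MAX_MAIL_WIDTH, nq - 1, -1)
--                    if current[i] in ' \t'), nq)
--         if si <= nq and line_len > MAX_MAIL_WIDTH + 1:
--             # no usable split found: first space/tab after the width, if any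
--             si = next((i for i in range(MAX_MAIL_WIDTH + 1, line_len)
--                        if current[i] in ' \t'), line_len - 1)
--         if si >= line_len - 1:
--             result.append(current)
--             break
--         result.append(current[:si])
--         current = quote_chars + current[si + 1:]
--     return tuple(result)
-- ===== Notes on version B (the rewrite author's own statement) =====
-- stated objective: alternative
-- what changed: Replaced A's tail recursion and repeated tuple concatenations with an explicit while loop that accumulates the output lines in a list, finding each split index with next() over the same index ranges.
import Mathlib
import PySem

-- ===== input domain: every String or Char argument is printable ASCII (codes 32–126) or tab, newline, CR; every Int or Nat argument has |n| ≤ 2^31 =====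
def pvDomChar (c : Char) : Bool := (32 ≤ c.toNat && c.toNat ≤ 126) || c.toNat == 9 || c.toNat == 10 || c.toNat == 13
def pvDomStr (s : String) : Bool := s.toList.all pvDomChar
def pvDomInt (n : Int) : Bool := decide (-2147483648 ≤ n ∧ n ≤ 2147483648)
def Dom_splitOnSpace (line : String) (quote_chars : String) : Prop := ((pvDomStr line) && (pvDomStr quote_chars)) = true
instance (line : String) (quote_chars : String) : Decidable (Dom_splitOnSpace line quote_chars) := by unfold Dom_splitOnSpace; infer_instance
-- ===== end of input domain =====

-- B replaces A's tail recursion and repeated tuple concatenations by an explicit loop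
-- accumulating a result list (same split positions); objective: alternative decomposition.


-- ===== PORT A =====
-- 'c in [' ', '\t']'
def pvIsSp (c : Char) : Bool := c == ' ' || c == '\t'

-- A's 'for space_index in r: if line[space_index] in [' ','\t']: break' — the loop
-- variable leaks: on break it is the found index, on exhaustion the last iterated
-- value; 'cur' is its previous value (used only when the range is empty).
def pvScanBreak (line : List Char) : Int → List Int → Int
  | cur, [] => cur
  | _, i :: rest =>
    if pvIsSp (PySem.List.pyGetD line i ' ') then i else pvScanBreak line i rest

-- recursive body of A; fuel only makes the recursion total (line.length + 1 always
-- suffices inside Pre_, where each recursive call shortens the line)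
def splitOnSpaceCore (qc : List Char) : Nat → List Char → List (List Char)
  | 0, _ => []
  | fuel+1, line =>
    let lineLen : Int := (PySem.Chars.rstrip line).length
    if lineLen ≤ 78 then [line]
    else
      let si1 := pvScanBreak line 0 (PySem.List.pyRange 78 ((qc.length : Int) - 1) (-1))
      let si := if si1 ≤ (qc.length : Int)
                then pvScanBreak line si1 (PySem.List.pyRange 79 lineLen 1)
                else si1
      if si ≥ lineLen - 1 then [line]
      else PySem.List.slice line none (some si) ::
           splitOnSpaceCore qc fuel (qc ++ PySem.List.slice line (some (si + 1)) none)

def splitOnSpace (line : String) (quote_chars : String) : List String :=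
  (splitOnSpaceCore quote_chars.toList (line.toList.length + 1) line.toList).map String.ofList

-- ===== PORT B =====
-- next((i for i in r if current[i] in ' \t'), default)
def pvNextSp (current : List Char) (r : List Int) (dflt : Int) : Int :=
  (r.find? (fun i => pvIsSp (PySem.List.pyGetD current i ' '))).getD dflt

-- B's split-index computation for one line
def pvFindSplit (nq : Int) (current : List Char) (lineLen : Int) : Int :=
  let si := pvNextSp current (PySem.List.pyRange 78 (nq - 1) (-1)) nq
  if si ≤ nq ∧ 79 < lineLen then
    pvNextSp current (PySem.List.pyRange 79 lineLen 1) (lineLen - 1)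
  else si

-- B's while loop: 'result' is the accumulator; fuel only makes the loop total
def pvWrapLoop (qc : List Char) : Nat → List (List Char) → List Char → List (List Char)
  | 0, acc, _ => acc
  | fuel+1, acc, current =>
    let lineLen : Int := (PySem.Chars.rstrip current).length
    if lineLen ≤ 78 then acc ++ [current]
    else
      let si := pvFindSplit (qc.length : Int) current lineLen
      if si ≥ lineLen - 1 then acc ++ [current]
      else pvWrapLoop qc fuel (acc ++ [PySem.List.slice current none (some si)])
                      (qc ++ PySem.List.slice current (some (si + 1)) none)

def splitOnSpace_alt (line : String) (quote_chars : String) : List String :=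
  (pvWrapLoop quote_chars.toList (line.toList.length + 1) [] line.toList).map String.ofList

-- ===== PRECONDITION & SPEC =====
-- Pre_ excludes exactly the inputs where A raises NameError: a quote prefix longer than
-- MAX_MAIL_WIDTH together with a too-long line makes A's first range empty, so
-- 'space_index' is never bound.
def Pre_splitOnSpace (line : String) (quote_chars : String) : Prop :=
  quote_chars.toList.length ≤ 78 ∨ (PySem.Chars.rstrip line.toList).length ≤ 78
instance (line : String) (quote_chars : String) : Decidable (Pre_splitOnSpace line quote_chars) := by
  unfold Pre_splitOnSpace; infer_instance

def pvWitness_splitOnSpace : String × String := ("> hello world", "> ")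

def Spec_splitOnSpace (line : String) (quote_chars : String) (out : List String) : Prop :=
  out = splitOnSpace_alt line quote_chars
instance (line : String) (quote_chars : String) (out : List String) : Decidable (Spec_splitOnSpace line quote_chars out) := by
  unfold Spec_splitOnSpace; infer_instance

-- ===== CLAIM (what is proved, stated in full; the proofs are below) =====
def Claim_equal_splitOnSpace : Prop := ∀ (line : String) (quote_chars : String), Dom_splitOnSpace line quote_chars → Pre_splitOnSpace line quote_chars → Spec_splitOnSpace line quote_chars (splitOnSpace line quote_chars)

-- ===== LEMMAS AND PROOFS =====

-- a break-scan is a find? with the range's last element (or the previous value) as default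
theorem pvScanBreak_eq_find (line : List Char) (cur : Int) (r : List Int) :
    pvScanBreak line cur r
      = ((r.find? (fun i => pvIsSp (PySem.List.pyGetD line i ' '))).getD (r.getLastD cur)) := by
  induction r generalizing cur with
  | nil => rfl
  | cons i rest ih =>
    simp only [pvScanBreak, List.find?, List.getLastD_cons]
    by_cases h : pvIsSp (PySem.List.pyGetD line i ' ') = true
    · simp [h]
    · simp only [Bool.not_eq_true] at h
      simp [h, ih]

theorem pyRange_desc_getLast? (nq : Int) (h : nq ≤ 78) :
    (PySem.List.pyRange 78 (nq - 1) (-1)).getLast? = some nq := by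
  have hlt : nq - 1 < 78 := by omega
  simp only [PySem.List.pyRange, if_neg (by norm_num : (-1 : Int) ≠ 0)]
  norm_num [hlt, List.getLast?_map, List.getLast?_range]
  exact ⟨(78 - nq).toNat, ⟨h, by omega⟩, by omega⟩

theorem pyRange_asc_getLast? (b : Int) (h : 79 < b) :
    (PySem.List.pyRange 79 b 1).getLast? = some (b - 1) := by
  simp only [PySem.List.pyRange, if_neg (by norm_num : (1 : Int) ≠ 0)]
  norm_num [h, List.getLast?_map, List.getLast?_range]
  omega

theorem pyRange_asc_nil (b : Int) (h : b ≤ 79) :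
    PySem.List.pyRange 79 b 1 = [] := by
  simp [PySem.List.pyRange, not_lt.mpr h]

-- the two ports compute the same split index
theorem findSplit_eq (qc : List Char) (line : List Char) (lineLen : Int)
    (hq : (qc.length : Int) ≤ 78) :
    pvFindSplit (qc.length : Int) line lineLen
      = (let si1 := pvScanBreak line 0 (PySem.List.pyRange 78 ((qc.length : Int) - 1) (-1))
         if si1 ≤ (qc.length : Int)
         then pvScanBreak line si1 (PySem.List.pyRange 79 lineLen 1)
         else si1) := by
  simp only [pvFindSplit, pvNextSp, pvScanBreak_eq_find]
  rw [List.getLastD_eq_getLast?, pyRange_desc_getLast? _ hq]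
  simp only [Option.getD_some]
  by_cases h1 : ((PySem.List.pyRange 78 ((qc.length : Int) - 1) (-1)).find?
      (fun i => pvIsSp (PySem.List.pyGetD line i ' '))).getD (qc.length : Int) ≤ (qc.length : Int)
  · by_cases h2 : 79 < lineLen
    · rw [List.getLastD_eq_getLast?, pyRange_asc_getLast? _ h2]
      simp [h1, h2]
    · have hnil := pyRange_asc_nil lineLen (by omega)
      simp [h1, h2, hnil]
  · simp [h1]

-- B's loop accumulates exactly A's recursion
theorem wrapLoop_eq (qc : List Char) (hq : (qc.length : Int) ≤ 78) :
    ∀ (fuel : Nat) (line : List Char) (acc : List (List Char)),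
      pvWrapLoop qc fuel acc line = acc ++ splitOnSpaceCore qc fuel line := by
  intro fuel
  induction fuel with
  | zero => intro line acc; simp [pvWrapLoop, splitOnSpaceCore]
  | succ n ih =>
    intro line acc
    simp only [pvWrapLoop, splitOnSpaceCore, findSplit_eq qc line _ hq]
    by_cases h0 : ((PySem.Chars.rstrip line).length : Int) ≤ 78
    · simp [h0]
    · simp only [h0, if_false]
      set si := (if pvScanBreak line 0 (PySem.List.pyRange 78 ((qc.length : Int) - 1) (-1)) ≤ (qc.length : Int)
                 then pvScanBreak line (pvScanBreak line 0 (PySem.List.pyRange 78 ((qc.length : Int) - 1) (-1)))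
                        (PySem.List.pyRange 79 ((PySem.Chars.rstrip line).length : Int) 1)
                 else pvScanBreak line 0 (PySem.List.pyRange 78 ((qc.length : Int) - 1) (-1))) with hsi
      by_cases h1 : si ≥ ((PySem.Chars.rstrip line).length : Int) - 1
      · simp [h1]
      · simp [h1, ih]

-- ===== VERDICT (by name: the statement is the Claim_ definition above) =====
theorem splitOnSpace_spec : Claim_equal_splitOnSpace := by
  intro line qc _hdom hpre
  unfold Spec_splitOnSpace splitOnSpace splitOnSpace_alt
  rcases hpre with hq | hshort
  · rw [wrapLoop_eq qc.toList (by exact_mod_cast hq)]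
    simp
  · cases hl : line.toList.length + 1 with
    | zero => simp at hl
    | succ n =>
      simp only [pvWrapLoop, splitOnSpaceCore]
      have : ((PySem.Chars.rstrip line.toList).length : Int) ≤ 78 := by exact_mod_cast hshort
      simp [this]
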